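-- pv_equiv track=rewrite | github.com/jalil/General | Solutions Archive/Python-BreakingTheCaesarCipher.py | analyzeCaesar
-- ===== SOURCE A (Python) =====
-- def analyzeCaesar(strCiphertext):
--
-- 	#Variable declarations
-- 	strAlphabet = "abcdefghijklmnopqrstuvwxyz"
-- 	lstPossibilities = []
--
-- 	#Procedural execution start
-- 	strCiphertext = strCiphertext.lower()
-- 	for idx in range(26):
-- 		strPossibility = ""
-- 		for character in strCiphertext:
-- 			if character == ' ':
-- 				strPossibility += ' '
-- 			else:
-- 				intCharIdx = strAlphabet.index(character)
-- 				strPossibility += strAlphabet[(intCharIdx - idx) % 26]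
-- 		lstPossibilities.append(strPossibility)
-- 	return lstPossibilities
-- ===== SOURCE B (Python) =====
-- def analyzeCaesar(strCiphertext):
-- 	strAlphabet = "abcdefghijklmnopqrstuvwxyz"
-- 	# map every letter to its predecessor (a -> z): one translation table
-- 	shiftBack = str.maketrans(strAlphabet, strAlphabet[-1] + strAlphabet[:-1])
-- 	cur = strCiphertext.lower()
-- 	lstPossibilities = []
-- 	for _ in range(26):
-- 		lstPossibilities.append(cur)
-- 		cur = cur.translate(shiftBack)
-- 	return lstPossibilities
-- ===== Notes on version B (the rewrite author's own statement) =====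
-- stated objective: faster
-- what changed: B replaces A's nested loop (recomputing strAlphabet.index for every character in each of the 26 shifts) by a chain: it builds one shift-back-by-one translation table with str.maketrans and derives each possibility from the previous one via str.translate.
import Mathlib
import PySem

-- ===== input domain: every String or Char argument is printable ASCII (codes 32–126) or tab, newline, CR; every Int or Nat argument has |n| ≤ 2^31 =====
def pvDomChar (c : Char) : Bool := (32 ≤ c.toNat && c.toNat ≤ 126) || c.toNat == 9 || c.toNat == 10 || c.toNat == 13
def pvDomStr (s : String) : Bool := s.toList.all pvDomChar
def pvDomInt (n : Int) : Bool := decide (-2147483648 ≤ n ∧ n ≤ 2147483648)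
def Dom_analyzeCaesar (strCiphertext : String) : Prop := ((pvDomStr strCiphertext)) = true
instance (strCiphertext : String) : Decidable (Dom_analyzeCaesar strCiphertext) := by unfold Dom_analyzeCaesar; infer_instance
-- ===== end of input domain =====

-- B builds the 26 possibilities as a chain: start from the lowered text and repeatedly apply one
-- shift-every-letter-back-by-one translation (str.translate), instead of A's nested loop that
-- re-indexes every character for each of the 26 shifts.


-- ===== PORT A =====
-- A: for each shift idx in range(26), walk the lowered text, looking up each character's
-- alphabet index on the spot; strings are built on the List Char side.
def analyzeCaesar (strCiphertext : String) : List String :=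
  let alpha : List Char := "abcdefghijklmnopqrstuvwxyz".toList
  let low : List Char := (PySem.Str.lower strCiphertext).toList
  (PySem.List.pyRange 0 26 1).foldl (fun acc idx =>
    let poss : List Char := low.foldl (fun p c =>
      if c = ' ' then p ++ [' ']
      else
        let ci : Int := (((PySem.List.index? alpha c).getD 0 : Nat) : Int)
        p ++ [(PySem.List.pyGet? alpha (PySem.Int.mod (ci - idx) 26)).getD ' ']) []
    acc ++ [String.mk poss]) []

-- ===== PORT B =====
-- B: one translation table mapping each letter to its predecessor (a -> z); the loop appends the
-- current string and translates it, 26 times.  'str.maketrans'/'str.translate' are ported by hand: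
-- the table maps alphabet[i] to shifted[i] and translate applies it per character, leaving
-- characters not in the table unchanged — exact for this single-character table.
def analyzeCaesar_alt (strCiphertext : String) : List String :=
  let alpha : List Char := "abcdefghijklmnopqrstuvwxyz".toList
  -- strAlphabet[-1] + strAlphabet[:-1]
  let shifted : List Char := (PySem.List.pyGet? alpha (-1)).getD ' ' :: PySem.List.slice alpha none (some (-1))
  let trans : Char → Char := fun c =>
    match PySem.List.index? alpha c with
    | some i => shifted.getD i c
    | none => c
  let low : List Char := (PySem.Str.lower strCiphertext).toList
  ((PySem.List.pyRange 0 26 1).foldl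
    (fun (acc : List String × List Char) _ => (acc.1 ++ [String.mk acc.2], acc.2.map trans))
    ([], low)).1

-- ===== PRECONDITION & SPEC =====
-- Pre_ excludes exactly the inputs on which Python A raises ValueError (a character of the lowered
-- text that is neither a space nor a lowercase letter).
def Pre_analyzeCaesar (strCiphertext : String) : Prop :=
  ((PySem.Str.lower strCiphertext).toList.all
    (fun c => c == ' ' || c ∈ "abcdefghijklmnopqrstuvwxyz".toList)) = true
instance (strCiphertext : String) : Decidable (Pre_analyzeCaesar strCiphertext) := by
  unfold Pre_analyzeCaesar; infer_instance
def pvWitness_analyzeCaesar : String := "Khoor Zruog"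

def Spec_analyzeCaesar (strCiphertext : String) (out : List String) : Prop := out = analyzeCaesar_alt strCiphertext
instance (strCiphertext : String) (out : List String) : Decidable (Spec_analyzeCaesar strCiphertext out) := by unfold Spec_analyzeCaesar; infer_instance

-- ===== CLAIM (what is proved, stated in full; the proofs are below) =====
def Claim_equal_analyzeCaesar : Prop := ∀ (strCiphertext : String), Dom_analyzeCaesar strCiphertext → Pre_analyzeCaesar strCiphertext → Spec_analyzeCaesar strCiphertext (analyzeCaesar strCiphertext)

-- ===== LEMMAS AND PROOFS =====

def pvAlpha : List Char := "abcdefghijklmnopqrstuvwxyz".toList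

-- the per-character translation of B
def pvTr (c : Char) : Char :=
  match PySem.List.index? pvAlpha c with
  | some i => ((PySem.List.pyGet? pvAlpha (-1)).getD ' ' :: PySem.List.slice pvAlpha none (some (-1))).getD i c
  | none => c

-- the character rendered by A at shift idx for a letter of index i
def pvR (i idx : Int) : Char := pvAlpha.getD (PySem.Int.mod (i - idx) 26).toNat ' '

-- A's possibility at shift idx
def pvRend (low : List Char) (idx : Int) : List Char :=
  low.map (fun c => if c = ' ' then ' '
    else pvR (((PySem.List.index? pvAlpha c).getD 0 : Nat) : Int) idx)

theorem pv_foldl_append_singleton {α β : Type} (g : α → β) (l : List α) (acc : List β) :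
    l.foldl (fun a x => a ++ [g x]) acc = acc ++ l.map g := by
  induction l generalizing acc with
  | nil => simp
  | cons x xs ih => simp [List.foldl, ih]

theorem pv_hget (j : Int) : (PySem.List.pyGet? pvAlpha (PySem.Int.mod j 26)).getD ' '
    = pvAlpha.getD (PySem.Int.mod j 26).toNat ' ' := by
  have hpos : (0:Int) < 26 := by norm_num
  have hm : PySem.Int.mod j 26 = j % 26 := PySem.Int.mod_eq_emod_of_pos hpos
  have h0 : 0 ≤ j % 26 := Int.emod_nonneg j (by norm_num)
  rw [hm, PySem.List.pyGet?_of_nonneg _ h0]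
  simp [List.getD]

-- A's port equals the map of pvRend over the 26 shifts
theorem pvA_eq (s : String) :
    analyzeCaesar s = (PySem.List.pyRange 0 26 1).map
      (fun idx => String.mk (pvRend ((PySem.Str.lower s).toList) idx)) := by
  unfold analyzeCaesar
  simp only
  set low : List Char := (PySem.Str.lower s).toList with hlow
  have step : ∀ (idx : Int),
      (fun (p : List Char) c => if c = ' ' then p ++ [' ']
        else p ++ [(PySem.List.pyGet? pvAlpha
          (PySem.Int.mod ((((PySem.List.index? pvAlpha c).getD 0 : Nat) : Int) - idx) 26)).getD ' '])
      = (fun p c => p ++ [if c = ' ' then ' '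
        else (PySem.List.pyGet? pvAlpha
          (PySem.Int.mod ((((PySem.List.index? pvAlpha c).getD 0 : Nat) : Int) - idx) 26)).getD ' ']) := by
    intro idx; funext p c; by_cases h : c = ' ' <;> simp [h]
  rw [show ("abcdefghijklmnopqrstuvwxyz".toList) = pvAlpha from rfl]
  rw [pv_foldl_append_singleton (g := fun idx =>
    String.mk (low.foldl (fun p c =>
      if c = ' ' then p ++ [' ']
      else p ++ [(PySem.List.pyGet? pvAlpha
        (PySem.Int.mod ((((PySem.List.index? pvAlpha c).getD 0 : Nat) : Int) - idx) 26)).getD ' ']) []))]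
  simp only [List.nil_append]
  apply List.map_congr_left
  intro idx _
  rw [step idx, pv_foldl_append_singleton]
  simp only [List.nil_append]
  congr 1
  unfold pvRend
  apply List.map_congr_left
  intro c _
  by_cases h : c = ' '
  · simp [h]
  · simp only [if_neg h, pvR]
    exact pv_hget _

-- B's port: the fold ignoring the loop variable is an iterate of the translate map
theorem pv_foldl_chain (l : List Int) (out : List String) (cur : List Char) :
    ((l.foldl (fun (acc : List String × List Char) _ =>
        (acc.1 ++ [String.mk acc.2], acc.2.map pvTr)) (out, cur)).1)
    = out ++ (List.range l.length).map
        (fun k => String.mk ((fun x : List Char => x.map pvTr)^[k] cur)) := by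
  induction l generalizing out cur with
  | nil => simp
  | cons x xs ih =>
      simp only [List.foldl_cons, ih, List.length_cons, List.range_succ_eq_map]
      simp [Function.iterate_succ_apply, List.map_map, Function.comp_def]

-- per letter-position: translating one rendered character shifts it back one place
theorem pvTr_alpha (m : Fin 26) :
    pvTr (pvAlpha.getD m.val ' ') = pvAlpha.getD ((m.val + 25) % 26) ' ' := by
  revert m; decide

theorem pvTr_space : pvTr ' ' = ' ' := by decide

-- translating A's rendering at shift idx gives A's rendering at shift idx+1
theorem pvTr_R (i idx : Int) :
    pvTr (pvR i idx) = pvR i (idx + 1) := by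
  unfold pvR
  have hpos : (0:Int) < 26 := by norm_num
  have hm : ∀ j : Int, PySem.Int.mod j 26 = j % 26 := fun j => PySem.Int.mod_eq_emod_of_pos hpos
  rw [hm, hm]
  have hmn : (0:Int) ≤ (i - idx) % 26 := Int.emod_nonneg _ (by norm_num)
  have hml : (i - idx) % 26 < 26 := Int.emod_lt_of_pos _ hpos
  have hfin : ((i - idx) % 26).toNat < 26 := by omega
  have h := pvTr_alpha ⟨((i - idx) % 26).toNat, hfin⟩
  simp only at h
  rw [h]
  congr 1
  omega

-- under Pre_, k translations of the lowered text give A's possibility at shift k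
theorem pv_iter_eq_rend (low : List Char)
    (hpre : low.all (fun c => c == ' ' || c ∈ pvAlpha) = true) (k : Nat) :
    (fun x : List Char => x.map pvTr)^[k] low = pvRend low (k : Int) := by
  induction k with
  | zero =>
      simp only [Function.iterate_zero, id_eq, pvRend]
      have hid : ∀ c ∈ low, (if c = ' ' then ' '
          else pvR (((PySem.List.index? pvAlpha c).getD 0 : Nat) : Int) 0) = c := by
        intro c hc
        by_cases hsp : c = ' '
        · simp [hsp]
        · rw [if_neg hsp]
          have hmem : c ∈ pvAlpha := by
            have := (List.all_eq_true.mp hpre) c hc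
            simpa [hsp] using this
          obtain ⟨j, hj⟩ := Option.isSome_iff_exists.mp
            ((PySem.List.index?_isSome_iff pvAlpha c).mpr hmem)
          obtain ⟨hjlt, hja, -⟩ := PySem.List.getElem_of_index?_eq_some hj
          unfold pvR
          rw [hj]
          simp only [Option.getD_some]
          have hmod : PySem.Int.mod ((j : Int) - 0) 26 = (j : Int) := by
            rw [PySem.Int.mod_eq_emod_of_pos (by norm_num)]
            have hlen : pvAlpha.length = 26 := by decide
            omega
          rw [hmod]
          simp [List.getD, List.getElem?_eq_getElem hjlt, hja]
      symm
      conv_rhs => rw [← List.map_id low]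
      exact List.map_congr_left (fun c hc => hid c hc)
  | succ n ih =>
      rw [Function.iterate_succ_apply', ih]
      unfold pvRend
      rw [List.map_map]
      apply List.map_congr_left
      intro c hc
      simp only [Function.comp_apply]
      by_cases hsp : c = ' '
      · simp [hsp, pvTr_space]
      · simp only [if_neg hsp]
        rw [pvTr_R]
        congr 1

theorem analyzeCaesar_spec : Claim_equal_analyzeCaesar := by
  intro s _ hpre
  unfold Spec_analyzeCaesar
  rw [pvA_eq]
  unfold analyzeCaesar_alt
  simp only
  rw [show ("abcdefghijklmnopqrstuvwxyz".toList) = pvAlpha from rfl]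
  rw [show (fun c => match PySem.List.index? pvAlpha c with
      | some i => ((PySem.List.pyGet? pvAlpha (-1)).getD ' ' :: PySem.List.slice pvAlpha none (some (-1))).getD i c
      | none => c) = pvTr from rfl]
  rw [pv_foldl_chain]
  simp only [List.nil_append]
  rw [PySem.List.pyRange_one]
  norm_num
  intro k hk
  have hpre' := hpre
  unfold Pre_analyzeCaesar at hpre'
  rw [PySem.Str.toList_lower] at hpre'
  rw [pv_iter_eq_rend _ hpre' k]
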